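-- pv_equiv track=rewrite | github.com/genzgd/Lampost-Mud | lampost/model/entity.py | gen_ids
-- ===== SOURCE A (Python) =====
-- import math
--
-- def gen_ids(target_id):
--     prefix_count = len(target_id) - 1
--     target = target_id[prefix_count],
--     for x in range(0, int(math.pow(2, prefix_count))):
--         next_prefix = []
--         for y in range(0, prefix_count):
--             if int(math.pow(2, y)) & x:
--                 next_prefix.append(target_id[y])
--         yield tuple(next_prefix) + target
-- ===== SOURCE B (Python) =====
-- def gen_ids(target_id):
--     target = (target_id[-1],)
--
--     def subsets(k):
--         if k == 0:
--             return [()]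
--         smaller = subsets(k - 1)
--         return smaller + [p + (target_id[k - 1],) for p in smaller]
--
--     for p in subsets(len(target_id) - 1):
--         yield p + target
-- ===== Notes on version B (the rewrite author's own statement) =====
-- stated objective: alternative
-- what changed: Replaces A's per-integer bit decoding (for each x in range(2^k), test each power-of-two mask via math.pow) by a recursive power-set construction that doubles the subset list once per prefix element, producing the same binary-counting order.
import Mathlib
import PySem

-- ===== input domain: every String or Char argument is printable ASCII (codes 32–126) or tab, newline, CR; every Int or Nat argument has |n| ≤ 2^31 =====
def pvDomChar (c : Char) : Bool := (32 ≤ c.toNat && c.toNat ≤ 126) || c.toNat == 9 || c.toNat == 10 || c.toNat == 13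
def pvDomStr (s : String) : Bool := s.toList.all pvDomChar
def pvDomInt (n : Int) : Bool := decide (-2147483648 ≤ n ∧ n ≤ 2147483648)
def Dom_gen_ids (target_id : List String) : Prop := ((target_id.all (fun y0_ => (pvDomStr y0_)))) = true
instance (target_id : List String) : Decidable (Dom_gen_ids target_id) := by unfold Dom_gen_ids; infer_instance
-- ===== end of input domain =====

-- B replaces A's per-integer bit decoding by a recursive power-set doubling (same output order).

-- ===== PORT A =====
-- A: for x in range(2^(len-1)): collect target_id[y] for each set bit y, append the last element.
def gen_ids (target_id : List String) : List (List String) :=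
  -- prefix_count = len(target_id) - 1; target = target_id[prefix_count]
  match PySem.List.pyGet? target_id ((target_id.length : Int) - 1) with
  | none => []   -- Python raises IndexError here (empty list); excluded by Pre_
  | some tgt =>
    (List.range (2 ^ (target_id.length - 1))).map (fun x =>
      ((List.range (target_id.length - 1)).foldl (fun acc y =>
        if 2 ^ y &&& x ≠ 0 then acc ++ [target_id.getD y ""] else acc) []) ++ [tgt])

-- ===== PORT B =====
-- B: subsets(k) is built recursively (subsets of the first k elements, doubling per step);
-- target_id[-1] is the appended last element.
def genIdsSubsets (target_id : List String) : Nat → List (List String)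
  | 0 => [[]]
  | k + 1 =>
    let smaller := genIdsSubsets target_id k
    smaller ++ smaller.map (fun p => p ++ [target_id.getD k ""])

def gen_ids_alt (target_id : List String) : List (List String) :=
  match PySem.List.pyGet? target_id (-1) with
  | none => []   -- Python raises IndexError here (empty list); excluded by Pre_
  | some tgt => (genIdsSubsets target_id (target_id.length - 1)).map (fun p => p ++ [tgt])

-- ===== PRECONDITION & SPEC =====
-- Pre_ excludes only the empty list, on which Python A (and B) raise IndexError.
def Pre_gen_ids (target_id : List String) : Prop := target_id ≠ []
instance (target_id : List String) : Decidable (Pre_gen_ids target_id) := by unfold Pre_gen_ids; infer_instance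
def pvWitness_gen_ids : List String := (["a", "b"])
def Spec_gen_ids (target_id : List String) (out : List (List String)) : Prop := out = gen_ids_alt target_id
instance (target_id : List String) (out : List (List String)) : Decidable (Spec_gen_ids target_id out) := by unfold Spec_gen_ids; infer_instance

-- ===== CLAIM (what is proved, stated in full; the proofs are below) =====
def Claim_equal_gen_ids : Prop := ∀ (target_id : List String), Dom_gen_ids target_id → Pre_gen_ids target_id → Spec_gen_ids target_id (gen_ids target_id)

-- ===== LEMMAS AND PROOFS =====

lemma pvFoldl_congr {α β : Type} {l : List α} {f g : β → α → β} {b : β}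
    (h : ∀ x ∈ l, ∀ acc, f acc x = g acc x) : l.foldl f b = l.foldl g b := by
  induction l generalizing b with
  | nil => rfl
  | cons a t ih =>
    simp only [List.foldl_cons]
    rw [h a (by simp)]
    exact ih (fun x hx acc => h x (by simp [hx]) acc)

lemma bit_cond (x y : Nat) : (2 ^ y &&& x ≠ 0) ↔ x.testBit y := by
  rw [Nat.and_comm, Nat.and_two_pow]
  rcases x.testBit y with _ | _ <;> simp

lemma aRow_eq (l : List String) (pc x : Nat) :
    (List.range pc).foldl (fun acc y =>
        if 2 ^ y &&& x ≠ 0 then acc ++ [l.getD y ""] else acc) []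
      = (List.range pc).foldl (fun acc y =>
        if x.testBit y then acc ++ [l.getD y ""] else acc) [] := by
  apply pvFoldl_congr
  intro y _ acc
  simp [bit_cond]

lemma testBit_add_pow (x n y : Nat) (hy : y < n) :
    (2 ^ n + x).testBit y = x.testBit y := by
  simpa using Nat.testBit_two_pow_add_gt (x := x) hy

lemma aMap_eq_subs (l : List String) (pc : Nat) :
    (List.range (2 ^ pc)).map (fun x =>
      (List.range pc).foldl (fun acc y =>
        if x.testBit y then acc ++ [l.getD y ""] else acc) [])
      = genIdsSubsets l pc := by
  induction pc with
  | zero => rfl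
  | succ n ih =>
    have hsplit : List.range (2 ^ (n + 1)) =
        List.range (2 ^ n) ++ (List.range (2 ^ n)).map (2 ^ n + ·) := by
      rw [pow_succ, Nat.mul_two, List.range_add]
    rw [hsplit, List.map_append, List.map_map]
    show _ = genIdsSubsets l n ++ (genIdsSubsets l n).map (fun p => p ++ [l.getD n ""])
    congr 1
    · -- low half: bit n is 0 for x < 2^n
      rw [← ih]
      apply List.map_congr_left
      intro x hx
      simp only [List.mem_range] at hx
      rw [List.range_succ, List.foldl_append]
      simp [Nat.testBit_lt_two_pow hx]
    · -- high half: bit n is 1, lower bits unchanged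
      rw [← ih, List.map_map]
      apply List.map_congr_left
      intro x hx
      simp only [List.mem_range] at hx
      simp only [Function.comp]
      rw [List.range_succ, List.foldl_append]
      have hbit : (2 ^ n + x).testBit n = true := by
        simpa using Nat.testBit_two_pow_add_eq x n ▸ (by simp [Nat.testBit_lt_two_pow hx])
      have hlow : (List.range n).foldl (fun acc y =>
          if (2 ^ n + x).testBit y then acc ++ [l.getD y ""] else acc) []
          = (List.range n).foldl (fun acc y =>
          if x.testBit y then acc ++ [l.getD y ""] else acc) [] := by
        apply pvFoldl_congr
        intro y hy acc
        simp only [List.mem_range] at hy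
        rw [testBit_add_pow x n y hy]
      rw [List.foldl_cons, List.foldl_nil]
      simp only [hbit, if_true]
      rw [hlow]

lemma pyGet_neg_one (l : List String) (h : l ≠ []) :
    PySem.List.pyGet? l (-1) = PySem.List.pyGet? l ((l.length : Int) - 1) := by
  have hlen : 0 < l.length := List.length_pos_iff.mpr h
  simp only [PySem.List.pyGet?, PySem.List.pyIdx?]
  have h1 : (-1 : Int) + l.length = (l.length : Int) - 1 := by ring
  have h2 : ¬ ((l.length : Int) - 1 < 0) := by omega
  have h3 : (l.length : Int) - 1 < l.length := by omega
  split_ifs with c1 c2 c3 <;> simp_all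

-- ===== VERDICT (by name: the statement is the Claim_ definition above) =====
theorem gen_ids_spec : Claim_equal_gen_ids := by
  intro target_id _ hpre
  unfold Spec_gen_ids gen_ids gen_ids_alt
  rw [pyGet_neg_one target_id hpre]
  cases hget : PySem.List.pyGet? target_id ((target_id.length : Int) - 1) with
  | none => rfl
  | some tgt =>
    simp only
    rw [← aMap_eq_subs target_id (target_id.length - 1), List.map_map]
    apply List.map_congr_left
    intro x _
    simp only [Function.comp]
    rw [aRow_eq]
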